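-- pv_equiv track=rewrite | github.com/CarsonV8824/Music-App | services/improved_song_lyrics.py | detect_anaphora
-- ===== SOURCE A (Python) =====
-- def detect_anaphora(text: str) -> int:
--     lines = [
--         line.strip().lower()
--         for line in text.split("\n")
--         if line.strip()
--     ]
--
--     count = 0
--     for i in range(len(lines) - 1):
--         if lines[i].split()[:2] == lines[i+1].split()[:2]:
--             count += 1
--
--     return count
-- ===== SOURCE B (Python) =====
-- def detect_anaphora(text: str) -> int:
--     lines = [
--         line.strip().lower()
--         for line in text.split("\n")
--         if line.strip()
--     ]
--
--     # run-length decomposition: each maximal run of lines sharing the same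
--     # two-word prefix contributes (run length - 1) adjacent repetitions
--     total = 0
--     run_key = None
--     run_len = 0
--     for line in lines:
--         key = line.split()[:2]
--         if run_len and key == run_key:
--             run_len += 1
--         else:
--             total += run_len - 1 if run_len else 0
--             run_key, run_len = key, 1
--     return total + (run_len - 1 if run_len else 0)
-- ===== Notes on version B (the rewrite author's own statement) =====
-- stated objective: alternative
-- what changed: Replaces the indexed adjacent-pair comparison loop over range(len-1) with a run-length decomposition: a single pass tracks the current run of lines sharing a two-word prefix and adds (run length - 1) per run.
import Mathlib
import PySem

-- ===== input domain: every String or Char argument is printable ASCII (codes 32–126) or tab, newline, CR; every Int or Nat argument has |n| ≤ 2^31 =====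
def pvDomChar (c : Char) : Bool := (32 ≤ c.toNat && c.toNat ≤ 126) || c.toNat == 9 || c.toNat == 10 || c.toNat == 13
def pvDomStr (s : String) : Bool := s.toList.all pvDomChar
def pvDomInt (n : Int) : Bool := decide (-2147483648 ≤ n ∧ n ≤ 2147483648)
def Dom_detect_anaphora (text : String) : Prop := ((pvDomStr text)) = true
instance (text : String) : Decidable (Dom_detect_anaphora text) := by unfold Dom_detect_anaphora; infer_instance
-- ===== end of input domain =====

-- B replaces A's indexed adjacent-pair comparison with a run-length pass; alternative decomposition, same cost.

-- ===== PORT A =====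
def detect_anaphora (text : String) : Int :=
  let lines := (((PySem.Str.split? text "\n").getD []).filter
      (fun l => decide (PySem.Str.strip l ≠ ""))).map
      (fun l => PySem.Str.lower (PySem.Str.strip l))
  (PySem.List.pyRange 0 ((lines.length : Int) - 1) 1).foldl
    (fun count i =>
      if (PySem.Str.split₀ (PySem.List.pyGetD lines i "")).take 2
          = (PySem.Str.split₀ (PySem.List.pyGetD lines (i + 1) "")).take 2
      then count + 1 else count) 0

-- ===== PORT B =====
def detect_anaphora_alt (text : String) : Int :=
  let lines := (((PySem.Str.split? text "\n").getD []).filter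
      (fun l => decide (PySem.Str.strip l ≠ ""))).map
      (fun l => PySem.Str.lower (PySem.Str.strip l))
  let st := lines.foldl
    (fun (s : Int × Option (List String) × Int) line =>
      let key := (PySem.Str.split₀ line).take 2
      if 0 < s.2.2 ∧ s.2.1 = some key then (s.1, s.2.1, s.2.2 + 1)
      else (s.1 + (if 0 < s.2.2 then s.2.2 - 1 else 0), some key, 1))
    (0, none, 0)
  st.1 + (if 0 < st.2.2 then st.2.2 - 1 else 0)

-- ===== PRECONDITION & SPEC =====
def Spec_detect_anaphora (text : String) (out : Int) : Prop := out = detect_anaphora_alt text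
instance (text : String) (out : Int) : Decidable (Spec_detect_anaphora text out) := by unfold Spec_detect_anaphora; infer_instance

-- ===== CLAIM (what is proved, stated in full; the proofs are below) =====
def Claim_equal_detect_anaphora : Prop := ∀ (text : String), Dom_detect_anaphora text → Spec_detect_anaphora text (detect_anaphora text)

-- ===== LEMMAS AND PROOFS =====

def pvKey (l : String) : List String := (PySem.Str.split₀ l).take 2

def pvAdj : List String → Nat
  | [] => 0
  | [_] => 0
  | a :: b :: t => (if pvKey a = pvKey b then 1 else 0) + pvAdj (b :: t)

lemma pvA_countP (L : List String) :
    (List.range (L.length - 1)).countP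
      (fun k => decide (pvKey (L.getD k "") = pvKey (L.getD (k + 1) ""))) = pvAdj L := by
  induction L with
  | nil => simp [pvAdj]
  | cons a t ih =>
    cases t with
    | nil => simp [pvAdj]
    | cons b t' =>
      have hlen : (a :: b :: t').length - 1 = ((b :: t').length - 1) + 1 := by
        simp
      rw [hlen, List.range_succ_eq_map, List.countP_cons, List.countP_map]
      have h2 : List.countP ((fun k => decide (pvKey ((a :: b :: t').getD k "") = pvKey ((a :: b :: t').getD (k + 1) ""))) ∘ Nat.succ) (List.range ((b :: t').length - 1))
          = List.countP (fun k => decide (pvKey ((b :: t').getD k "") = pvKey ((b :: t').getD (k + 1) ""))) (List.range ((b :: t').length - 1)) := by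
        apply List.countP_congr
        intro k _
        simp [Function.comp]
      rw [h2, ih]
      simp [pvAdj, List.getD]
      omega

def pvStepB (s : Int × Option (List String) × Int) (line : String) :
    Int × Option (List String) × Int :=
  let key := (PySem.Str.split₀ line).take 2
  if 0 < s.2.2 ∧ s.2.1 = some key then (s.1, s.2.1, s.2.2 + 1)
  else (s.1 + (if 0 < s.2.2 then s.2.2 - 1 else 0), some key, 1)

def pvAdjKey (k : List String) : List String → Int
  | [] => 0
  | b :: t => (if k = pvKey b then 1 else 0) + pvAdjKey (pvKey b) t

lemma pvB_inv (L : List String) : ∀ (t : Int) (a : List String) (rl : Int), 1 ≤ rl →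
    (let st := L.foldl pvStepB (t, some a, rl)
     st.1 + (if 0 < st.2.2 then st.2.2 - 1 else 0)) = t + (rl - 1) + pvAdjKey a L := by
  induction L with
  | nil =>
    intro t a rl h
    have hrl : (0 : Int) < rl := by omega
    simp [pvAdjKey, hrl]
  | cons b L ih =>
    intro t a rl h
    have hrl : (0 : Int) < rl := by omega
    simp only [List.foldl_cons]
    by_cases hk : a = pvKey b
    · have hstep : pvStepB (t, some a, rl) b = (t, some a, rl + 1) := by
        simp [pvStepB, pvKey] at hk ⊢
        simp [hk, hrl]
      rw [hstep, ih t a (rl + 1) (by omega)]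
      simp only [pvAdjKey]
      rw [if_pos hk, hk]
      ring
    · have hstep : pvStepB (t, some a, rl) b = (t + (rl - 1), some (pvKey b), 1) := by
        simp [pvStepB, pvKey] at hk ⊢
        simp [hk, hrl]
      rw [hstep, ih (t + (rl - 1)) (pvKey b) 1 le_rfl]
      simp only [pvAdjKey]
      rw [if_neg hk]
      ring

lemma pvAdjKey_eq (t : List String) : ∀ a, pvAdjKey (pvKey a) t = (pvAdj (a :: t) : Int) := by
  induction t with
  | nil => intro a; simp [pvAdjKey, pvAdj]
  | cons b t ih =>
    intro a
    simp only [pvAdjKey, pvAdj]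
    rw [ih b]
    push_cast
    split_ifs <;> ring

lemma pvB_eq (L : List String) :
    (let st := L.foldl pvStepB ((0 : Int), (none : Option (List String)), (0 : Int))
     st.1 + (if 0 < st.2.2 then st.2.2 - 1 else 0)) = (pvAdj L : Int) := by
  cases L with
  | nil => simp [pvAdj]
  | cons a t =>
    simp only [List.foldl_cons]
    have hstep : pvStepB (0, none, 0) a = (0, some (pvKey a), 1) := by
      simp [pvStepB, pvKey]
    rw [hstep]
    have := pvB_inv t 0 (pvKey a) 1 le_rfl
    simp only [this, pvAdjKey_eq t a]
    ring

lemma pvA_eq (L : List String) :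
    (PySem.List.pyRange 0 ((L.length : Int) - 1) 1).foldl
      (fun count i => if (PySem.Str.split₀ (PySem.List.pyGetD L i "")).take 2
          = (PySem.Str.split₀ (PySem.List.pyGetD L (i + 1) "")).take 2
        then count + 1 else count) 0 = (pvAdj L : Int) := by
  rw [PySem.List.foldl_ite_add_one]
  have hn : (((L.length : Int) - 1) - 0).toNat = L.length - 1 := by omega
  have key : (PySem.List.pyRange 0 ((L.length : Int) - 1) 1).countP
      (fun i => decide ((PySem.Str.split₀ (PySem.List.pyGetD L i "")).take 2
        = (PySem.Str.split₀ (PySem.List.pyGetD L (i + 1) "")).take 2)) = pvAdj L := by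
    rw [PySem.List.pyRange_one, hn, List.countP_map, ← pvA_countP L]
    apply List.countP_congr
    intro k _
    simp only [Function.comp_apply, zero_add]
    have hc : ((k : Int) + 1) = ((k + 1 : Nat) : Int) := by push_cast; ring
    rw [hc, PySem.List.pyGetD_natCast, PySem.List.pyGetD_natCast]
    simp [pvKey]
  rw [key]
  simp

-- ===== VERDICT (by name: the statement is the Claim_ definition above) =====
theorem detect_anaphora_spec : Claim_equal_detect_anaphora := by
  intro text _
  show detect_anaphora text = detect_anaphora_alt text
  unfold detect_anaphora detect_anaphora_alt
  generalize ((((PySem.Str.split? text "\n").getD []).filter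
      (fun l => decide (PySem.Str.strip l ≠ ""))).map
      (fun l => PySem.Str.lower (PySem.Str.strip l))) = L
  rw [pvA_eq L]
  exact (pvB_eq L).symm
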